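-- pv_equiv track=rewrite | github.com/dgsim126/Algo_Study_2 | Programmers/심동근/2504/250420/파핑파핑 지뢰찾기.py | solution
-- ===== SOURCE A (Python) =====
-- from collections import deque
--
-- def check_bomb(N, board, y, x):
--     dx= [0, 1, 1, 1, 0, -1, -1, -1] # 북 동 남 서
--     dy= [-1, -1, 0, 1, 1, 1, 0, -1]
--     cnt= 0
--
--     for i in range(8):
--         new_y= dy[i]+y
--         new_x= dx[i]+x
--         if(0<=new_y and new_y<N and 0<=new_x and new_x<N):
--             if(board[new_y][new_x]=="*"):
--                 cnt+=1
--     return cnt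
--
-- def bfs(N, board, y, x):
--     dx= [0, 1, 1, 1, 0, -1, -1, -1] # 북 동 남 서
--     dy= [-1, -1, 0, 1, 1, 1, 0, -1]
--     queue= deque()
--     queue.append((y, x))
--     board[y][x]= "0"
--
--     while(queue):
--         current_y, current_x = queue.popleft()
--         for i in range(8):
--             new_y = dy[i] + current_y
--             new_x = dx[i] + current_x
--             if (0 <= new_y and new_y < N and 0 <= new_x and new_x < N and board[new_y][new_x]=="."):
--                 bomb_cnt = check_bomb(N, board, new_y, new_x)
--                 board[new_y][new_x]= str(bomb_cnt)
--                 if (bomb_cnt == 0):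
--                     queue.append((new_y, new_x))
--
-- def solution(N, board):
--     result= 0
--
--     for y in range(N):
--         for x in range(N):
--             if(board[y][x]=="." and check_bomb(N, board, y, x)==0):
--                 bfs(N, board, y, x)
--                 result+=1
--
--     for y in range(N):
--         for x in range(N):
--             if board[y][x] == '.':
--                 result += 1
--
--     return result
-- ===== SOURCE B (Python) =====
-- NBRS = [(-1, -1), (-1, 0), (-1, 1), (0, -1), (0, 1), (1, -1), (1, 0), (1, 1)]
--
-- def solution(N, board):
--     # Note: unlike A, this implementation does not mutate `board`;
--     # the equivalence claimed is about the return value only.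
--     cnt = [[sum(1 for dy, dx in NBRS
--                 if 0 <= y + dy < N and 0 <= x + dx < N and board[y + dy][x + dx] == "*")
--             for x in range(N)] for y in range(N)]
--     zero = {(y, x) for y in range(N) for x in range(N)
--             if board[y][x] == "." and cnt[y][x] == 0}
--     seen = set()
--     result = 0
--     for y in range(N):
--         for x in range(N):
--             if (y, x) in zero and (y, x) not in seen:
--                 result += 1
--                 seen.add((y, x))
--                 stack = [(y, x)]
--                 while stack:
--                     cy, cx = stack.pop()
--                     for dy, dx in NBRS:
--                         q = (cy + dy, cx + dx)
--                         if q in zero and q not in seen: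
--                             seen.add(q)
--                             stack.append(q)
--     for y in range(N):
--         for x in range(N):
--             if board[y][x] == "." and cnt[y][x] > 0 and \
--                not any((y + dy, x + dx) in zero for dy, dx in NBRS):
--                 result += 1
--     return result
-- ===== Notes on version B (the rewrite author's own statement) =====
-- stated objective: alternative
-- what changed: Instead of A's in-place board mutation with per-cell neighbour recounts and a BFS deque that rewrites cells to digit strings, B precomputes a bomb-count table once, builds the set of zero-count '.' cells, counts its 8-connected components with a stack flood fill over that set, and counts the never-revealed '.' cells directly by a closed predicate (positive count and no zero-count neighbour); the board is never mutated.
import Mathlib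
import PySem

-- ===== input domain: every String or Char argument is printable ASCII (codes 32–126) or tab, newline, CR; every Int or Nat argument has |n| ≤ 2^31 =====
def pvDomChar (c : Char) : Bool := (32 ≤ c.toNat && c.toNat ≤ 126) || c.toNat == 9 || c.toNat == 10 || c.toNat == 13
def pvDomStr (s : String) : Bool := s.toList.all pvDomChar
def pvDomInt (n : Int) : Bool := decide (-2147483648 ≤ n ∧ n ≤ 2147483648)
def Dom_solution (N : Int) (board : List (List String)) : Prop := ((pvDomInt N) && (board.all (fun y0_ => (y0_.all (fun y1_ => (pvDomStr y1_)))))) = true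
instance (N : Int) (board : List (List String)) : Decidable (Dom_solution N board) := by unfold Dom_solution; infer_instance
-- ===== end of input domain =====

-- B replaces A's in-place board mutation + per-cell neighbour recounts + BFS deque by a precomputed
-- bomb-count table, a zero-cell set with a stack flood fill, and a closed predicate for the cells
-- that stay hidden.  A mutates its `board` argument in place; B does not — the equivalence claimed
-- here is about the RETURN VALUE only.

-- ===== PORT A =====
-- board[y][x] read/write (indices are always ≥ 0 where the ports use these)
def getCell (b : List (List String)) (y x : Int) : String :=
  PySem.List.pyGetD (PySem.List.pyGetD b y []) x ""

def setCell (b : List (List String)) (y x : Int) (v : String) : List (List String) :=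
  PySem.List.pySetD b y (PySem.List.pySetD (PySem.List.pyGetD b y []) x v)

def pvDys : List Int := [-1, -1, 0, 1, 1, 1, 0, -1]
def pvDxs : List Int := [0, 1, 1, 1, 0, -1, -1, -1]

def check_bomb (N : Int) (board : List (List String)) (y x : Int) : Int :=
  (List.range 8).foldl (fun cnt i =>
    let ny := pvDys.getD i 0 + y
    let nx := pvDxs.getD i 0 + x
    if 0 ≤ ny ∧ ny < N ∧ 0 ≤ nx ∧ nx < N then
      if getCell board ny nx = "*" then cnt + 1 else cnt
    else cnt) 0

-- one popped queue cell: scan the 8 neighbours, revealing '.' cells and enqueueing new zero cells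
def bfsStep (N : Int) (c : Int × Int) (qb : List (Int × Int) × List (List String)) :
    List (Int × Int) × List (List String) :=
  (List.range 8).foldl (fun qb i =>
    let ny := pvDys.getD i 0 + c.1
    let nx := pvDxs.getD i 0 + c.2
    if 0 ≤ ny ∧ ny < N ∧ 0 ≤ nx ∧ nx < N ∧ getCell qb.2 ny nx = "." then
      let bc := check_bomb N qb.2 ny nx
      let b' := setCell qb.2 ny nx (PySem.Int.toStr bc)
      (if bc = 0 then qb.1 ++ [(ny, nx)] else qb.1, b')
    else qb) qb

-- the `while queue` loop; `fuel` only makes the recursion structural (each iteration pops one cell,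
-- and at most one push per '.' cell ever happens, so N²+1 iterations always suffice — proved below)
def bfsLoop (N : Int) : Nat → List (Int × Int) → List (List String) → List (List String)
  | 0, _, b => b
  | _ + 1, [], b => b
  | fuel + 1, c :: rest, b =>
    let s := bfsStep N c (rest, b)
    bfsLoop N fuel s.1 s.2

def bfs (N : Int) (board : List (List String)) (y x : Int) : List (List String) :=
  bfsLoop N (N.toNat * N.toNat + 1) [(y, x)] (setCell board y x "0")

def solution (N : Int) (board : List (List String)) : Int :=
  let s1 := (PySem.List.pyRange 0 N 1).foldl (fun (st : Int × List (List String)) y =>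
    (PySem.List.pyRange 0 N 1).foldl (fun (st : Int × List (List String)) x =>
      if getCell st.2 y x = "." ∧ check_bomb N st.2 y x = 0 then
        (st.1 + 1, bfs N st.2 y x)
      else st) st) (0, board)
  (PySem.List.pyRange 0 N 1).foldl (fun r y =>
    (PySem.List.pyRange 0 N 1).foldl (fun r x =>
      if getCell s1.2 y x = "." then r + 1 else r) r) s1.1

-- ===== PORT B =====
def pvNbrs : List (Int × Int) := [(-1, -1), (-1, 0), (-1, 1), (0, -1), (0, 1), (1, -1), (1, 0), (1, 1)]

-- sum(1 for dy,dx in NBRS if …) — a 0/1 generator sum is the count of neighbours passing the test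
def cntCell (N : Int) (board : List (List String)) (y x : Int) : Int :=
  (pvNbrs.countP (fun d =>
    decide (0 ≤ y + d.1 ∧ y + d.1 < N ∧ 0 ≤ x + d.2 ∧ x + d.2 < N ∧
            getCell board (y + d.1) (x + d.2) = "*")) : Int)

def cntTable (N : Int) (board : List (List String)) : List (List Int) :=
  (PySem.List.pyRange 0 N 1).map (fun y =>
    (PySem.List.pyRange 0 N 1).map (fun x => cntCell N board y x))

def zeroSet (N : Int) (board : List (List String)) : PySem.Set (Int × Int) :=
  PySem.Set.ofList ((PySem.List.pyRange 0 N 1).flatMap (fun y =>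
    ((PySem.List.pyRange 0 N 1).filter (fun x =>
       decide (getCell board y x = "." ∧
               PySem.List.pyGetD (PySem.List.pyGetD (cntTable N board) y []) x 0 = 0))).map
      (fun x => (y, x))))

-- `while stack` flood fill; the stack holds the most recently pushed cell first (Python pushes and
-- pops at the same end); fuel N²+1 always suffices (each iteration pops one cell, each push is a
-- fresh `seen` insertion)
-- one popped stack cell: push every unseen zero-cell neighbour
def dfsStepF (zero : List (Int × Int)) (c : Int × Int)
    (ss : PySem.Set (Int × Int) × List (Int × Int)) (d : Int × Int) :
    PySem.Set (Int × Int) × List (Int × Int) :=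
  let q := (c.1 + d.1, c.2 + d.2)
  if q ∈ zero ∧ ¬ q ∈ ss.1 then (PySem.Set.add ss.1 q, q :: ss.2) else ss

def dfsLoop (zero : List (Int × Int)) : Nat → List (Int × Int) → PySem.Set (Int × Int) → PySem.Set (Int × Int)
  | 0, _, seen => seen
  | _ + 1, [], seen => seen
  | fuel + 1, c :: stk, seen =>
    let s := pvNbrs.foldl (dfsStepF zero c) (seen, stk)
    dfsLoop zero fuel s.2 s.1

def solution_alt (N : Int) (board : List (List String)) : Int :=
  let cnt := cntTable N board
  let zero := zeroSet N board
  let s1 := (PySem.List.pyRange 0 N 1).foldl (fun (st : Int × PySem.Set (Int × Int)) y =>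
    (PySem.List.pyRange 0 N 1).foldl (fun (st : Int × PySem.Set (Int × Int)) x =>
      if (y, x) ∈ zero ∧ ¬ (y, x) ∈ st.2 then
        (st.1 + 1, dfsLoop zero (N.toNat * N.toNat + 1) [(y, x)] (PySem.Set.add st.2 (y, x)))
      else st) st) (0, PySem.Set.empty)
  (PySem.List.pyRange 0 N 1).foldl (fun r y =>
    (PySem.List.pyRange 0 N 1).foldl (fun r x =>
      if getCell board y x = "." ∧ 0 < PySem.List.pyGetD (PySem.List.pyGetD cnt y []) x 0 ∧
         ¬ (pvNbrs.any (fun d => decide ((y + d.1, x + d.2) ∈ zero))) then r + 1 else r) r) s1.1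

-- ===== PRECONDITION & SPEC =====
-- A indexes board[y][x] for every 0 ≤ y,x < N: anything less raises IndexError; nothing else is excluded.
def Pre_solution (N : Int) (board : List (List String)) : Prop :=
  N ≤ (board.length : Int) ∧ ∀ row ∈ board.take N.toNat, N ≤ (row.length : Int)
instance (N : Int) (board : List (List String)) : Decidable (Pre_solution N board) := by
  unfold Pre_solution; infer_instance

def pvWitness_solution : Int × List (List String) := (2, [[".", "."], [".", "*"]])

def Spec_solution (N : Int) (board : List (List String)) (out : Int) : Prop := out = solution_alt N board
instance (N : Int) (board : List (List String)) (out : Int) : Decidable (Spec_solution N board out) := by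
  unfold Spec_solution; infer_instance

-- ===== CLAIM (what is proved, stated in full; the proofs are below) =====
def Claim_equal_solution : Prop := ∀ (N : Int) (board : List (List String)), Dom_solution N board → Pre_solution N board → Spec_solution N board (solution N board)

-- ===== LEMMAS AND PROOFS =====

-- ---------- abstract layer: grid, counts, zero cells, adjacency ----------
def pvOffsA : List (Int × Int) := [(-1,0),(-1,1),(0,1),(1,1),(1,0),(1,-1),(0,-1),(-1,-1)]

def inGrid (N : Int) (p : Int × Int) : Prop := 0 ≤ p.1 ∧ p.1 < N ∧ 0 ≤ p.2 ∧ p.2 < N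

def scanPairs (N : Int) : List (Int × Int) :=
  (PySem.List.pyRange 0 N 1).flatMap (fun y => (PySem.List.pyRange 0 N 1).map (fun x => (y, x)))

def gridF (N : Int) : Finset (Int × Int) := (scanPairs N).toFinset

def zfin (N : Int) (B0 : List (List String)) : Finset (Int × Int) :=
  (gridF N).filter (fun p => getCell B0 p.1 p.2 = "." ∧ cntCell N B0 p.1 p.2 = 0)

def adjP (p q : Int × Int) : Prop := (q.1 - p.1, q.2 - p.2) ∈ pvNbrs

def relZ (N : Int) (B0 : List (List String)) (p q : Int × Int) : Prop := q ∈ zfin N B0 ∧ adjP p q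

def BndP (N : Int) (B0 : List (List String)) (p : Int × Int) : Prop :=
  inGrid N p ∧ getCell B0 p.1 p.2 = "." ∧ cntCell N B0 p.1 p.2 ≠ 0

def modelC (N : Int) (B0 : List (List String)) (V M : Finset (Int × Int)) (p : Int × Int) : String :=
  if p ∈ V then "0" else if p ∈ M then PySem.Int.toStr (cntCell N B0 p.1 p.2) else getCell B0 p.1 p.2

def BState (N : Int) (B0 b : List (List String)) (V M : Finset (Int × Int)) : Prop :=
  b.length = B0.length ∧ (∀ i : Nat, (b.getD i []).length = (B0.getD i []).length) ∧
  ∀ y x : Int, 0 ≤ y → 0 ≤ x → getCell b y x = modelC N B0 V M (y, x)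

def GoodS (N : Int) (B0 b : List (List String)) (W : Finset (Int × Int)) : Prop :=
  W ⊆ zfin N B0 ∧ (∀ q ∈ W, ∀ p ∈ zfin N B0, adjP q p → p ∈ W) ∧
  ∃ M, BState N B0 b W M ∧ ∀ p, p ∈ M ↔ BndP N B0 p ∧ ∃ q ∈ W, adjP q p

-- the shared row-major component scan both first phases implement
inductive ScanRel (N : Int) (B0 : List (List String)) :
    List (Int × Int) → Finset (Int × Int) → Int → Finset (Int × Int) × Int → Prop
  | nil (W r) : ScanRel N B0 [] W r (W, r)
  | skip {p l W r out} : ¬ (p ∈ zfin N B0 ∧ p ∉ W) → ScanRel N B0 l W r out →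
      ScanRel N B0 (p :: l) W r out
  | hit {p l W W' r out} : p ∈ zfin N B0 → p ∉ W →
      (∀ q, q ∈ W' ↔ q ∈ W ∨ (q ∈ zfin N B0 ∧ Relation.ReflTransGen (relZ N B0) p q)) →
      ScanRel N B0 l W' (r + 1) out → ScanRel N B0 (p :: l) W r out

-- ---------- basic indexing lemmas ----------
lemma pyGetD_nonneg_getD {α : Type} (xs : List α) (i : Int) (d : α) (h : 0 ≤ i) :
    PySem.List.pyGetD xs i d = xs.getD i.toNat d := by
  by_cases hl : i.toNat < xs.length
  · rw [PySem.List.pyGetD_eq_getElem xs d h (by omega), List.getD_eq_getElem xs d hl]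
  · rw [PySem.List.pyGetD_of_none, List.getD_eq_default]
    · omega
    · rw [PySem.List.pyGet?_of_nonneg xs h]
      exact List.getElem?_eq_none (by omega)

lemma getCell_eq_getD (b : List (List String)) (y x : Int) (hy : 0 ≤ y) (hx : 0 ≤ x) :
    getCell b y x = ((b.getD y.toNat []).getD x.toNat "") := by
  rw [getCell, pyGetD_nonneg_getD _ _ _ hy, pyGetD_nonneg_getD _ _ _ hx]

lemma setCell_eq (b : List (List String)) (y x : Int) (v : String) (hy : 0 ≤ y) (hx : 0 ≤ x) :
    setCell b y x v = b.set y.toNat ((b.getD y.toNat []).set x.toNat v) := by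
  rw [setCell, pyGetD_nonneg_getD _ _ _ hy, PySem.List.pySetD_of_nonneg _ _ hx,
      PySem.List.pySetD_of_nonneg _ _ hy]

lemma getD_set {α : Type} (l : List α) (n i : Nat) (a d : α) :
    (l.set n a).getD i d = if n = i ∧ n < l.length then a else l.getD i d := by
  simp only [List.getD, List.getElem?_set]
  split_ifs with h1 h2 h3 h3 <;> simp_all <;> omega

lemma length_setCell (b : List (List String)) (y x : Int) (v : String) (hy : 0 ≤ y) (hx : 0 ≤ x) :
    (setCell b y x v).length = b.length := by
  rw [setCell_eq _ _ _ _ hy hx, List.length_set]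

lemma rowlen_setCell (b : List (List String)) (y x : Int) (v : String) (hy : 0 ≤ y) (hx : 0 ≤ x)
    (i : Nat) : ((setCell b y x v).getD i []).length = (b.getD i []).length := by
  rw [setCell_eq _ _ _ _ hy hx, getD_set]
  split_ifs with h
  · rw [← h.1, List.length_set]
  · rfl

lemma getCell_setCell (b : List (List String)) (y x : Int) (v : String) (hy : 0 ≤ y) (hx : 0 ≤ x)
    (hyl : y.toNat < b.length) (hxl : x.toNat < (b.getD y.toNat []).length)
    (y' x' : Int) (hy' : 0 ≤ y') (hx' : 0 ≤ x') :
    getCell (setCell b y x v) y' x' = if y' = y ∧ x' = x then v else getCell b y' x' := by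
  rw [getCell_eq_getD _ _ _ hy' hx', getCell_eq_getD _ _ _ hy' hx', setCell_eq _ _ _ _ hy hx,
      getD_set]
  by_cases h1 : y' = y
  · subst h1
    rw [if_pos ⟨rfl, hyl⟩, getD_set]
    by_cases h2 : x' = x
    · subst h2; rw [if_pos ⟨rfl, hxl⟩, if_pos ⟨rfl, rfl⟩]
    · rw [if_neg (fun hc => h2 (by omega)), if_neg (fun hc => h2 hc.2)]
  · rw [if_neg (fun hc => h1 (by omega)), if_neg (fun hc => h1 hc.1)]

-- shape facts from the precondition
lemma pre_row_len (N : Int) (B0 : List (List String)) (hpre : Pre_solution N B0)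
    (y : Int) (h0 : 0 ≤ y) (hN : y < N) : N ≤ ((B0.getD y.toNat []).length : Int) := by
  obtain ⟨h1, h2⟩ := hpre
  have hyl : y.toNat < B0.length := by omega
  rw [List.getD_eq_getElem _ _ hyl]
  apply h2
  have hlen : y.toNat < (B0.take N.toNat).length := by
    rw [List.length_take]; omega
  have hget : (B0.take N.toNat)[y.toNat] = B0[y.toNat] := List.getElem_take
  rw [← hget]
  exact List.getElem_mem _

-- ---------- string facts about written digit strings ----------
lemma cntStr_ne_dot (c : Int) (h0 : 0 ≤ c) (h8 : c ≤ 8) : PySem.Int.toStr c ≠ "." := by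
  interval_cases c <;> decide

lemma cntStr_ne_star (c : Int) (h0 : 0 ≤ c) (h8 : c ≤ 8) : PySem.Int.toStr c ≠ "*" := by
  interval_cases c <;> decide

lemma cntCell_nonneg (N : Int) (B0 : List (List String)) (y x : Int) : 0 ≤ cntCell N B0 y x := by
  unfold cntCell; exact Int.natCast_nonneg _

lemma cntCell_le8 (N : Int) (B0 : List (List String)) (y x : Int) : cntCell N B0 y x ≤ 8 := by
  have := List.countP_le_length (l := pvNbrs) (p := fun d =>
    decide (0 ≤ y + d.1 ∧ y + d.1 < N ∧ 0 ≤ x + d.2 ∧ x + d.2 < N ∧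
            getCell B0 (y + d.1) (x + d.2) = "*"))
  have hlen : pvNbrs.length = 8 := by decide
  unfold cntCell
  omega

lemma ite_ite_collapse (c : Int) (P Q : Prop) [Decidable P] [Decidable Q] :
    (if P then (if Q then c + 1 else c) else c) = if P ∧ Q then c + 1 else c := by
  split_ifs <;> tauto

-- ---------- neighbour list facts ----------
lemma offsA_map : (List.range 8).map (fun i => ((pvDys.getD i 0 : Int), (pvDxs.getD i 0 : Int))) = pvOffsA := by
  decide

lemma offsA_perm : pvOffsA.Perm pvNbrs := by decide

lemma mem_offsA_iff (d : Int × Int) : d ∈ pvOffsA ↔ d ∈ pvNbrs := offsA_perm.mem_iff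

lemma pvNbrs_neg {d : Int × Int} (h : d ∈ pvNbrs) : (-d.1, -d.2) ∈ pvNbrs := by
  fin_cases h <;> decide

lemma mem_gridF (N : Int) (p : Int × Int) : p ∈ gridF N ↔ inGrid N p := by
  simp only [gridF, scanPairs, List.mem_toFinset, List.mem_flatMap, List.mem_map,
    PySem.List.mem_pyRange_one]
  constructor
  · rintro ⟨y, ⟨h1, h2⟩, x, ⟨h3, h4⟩, rfl⟩
    exact ⟨h1, h2, h3, h4⟩
  · intro h
    exact ⟨p.1, ⟨h.1, h.2.1⟩, p.2, ⟨h.2.2.1, h.2.2.2⟩, rfl⟩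

-- ---------- the bomb count only reads '*'-ness ----------
lemma check_bomb_eq_cntCell (N : Int) (b B0 : List (List String)) (y x : Int)
    (hstar : ∀ q : Int × Int, inGrid N q → (getCell b q.1 q.2 = "*" ↔ getCell B0 q.1 q.2 = "*")) :
    check_bomb N b y x = cntCell N B0 y x := by
  unfold check_bomb cntCell
  simp only [ite_ite_collapse]
  rw [PySem.List.foldl_ite_add_one (p := fun i : Nat =>
    (0 ≤ pvDys.getD i 0 + y ∧ pvDys.getD i 0 + y < N ∧ 0 ≤ pvDxs.getD i 0 + x ∧
     pvDxs.getD i 0 + x < N) ∧ getCell b (pvDys.getD i 0 + y) (pvDxs.getD i 0 + x) = "*")]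
  rw [show (List.countP (fun i : Nat => decide ((0 ≤ pvDys.getD i 0 + y ∧ pvDys.getD i 0 + y < N ∧
        0 ≤ pvDxs.getD i 0 + x ∧ pvDxs.getD i 0 + x < N) ∧
        getCell b (pvDys.getD i 0 + y) (pvDxs.getD i 0 + x) = "*")) (List.range 8)) =
      (List.countP (fun d : Int × Int => decide ((0 ≤ d.1 + y ∧ d.1 + y < N ∧ 0 ≤ d.2 + x ∧
        d.2 + x < N) ∧ getCell b (d.1 + y) (d.2 + x) = "*")) pvOffsA) from by
    rw [show pvOffsA = (List.range 8).map (fun i => ((pvDys.getD i 0 : Int), (pvDxs.getD i 0 : Int))) from by decide,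
       List.countP_map]
    rfl]
  rw [List.Perm.countP_eq _ (by decide : pvOffsA.Perm pvNbrs)]
  rw [zero_add]
  congr 1
  apply List.countP_congr
  intro d _
  simp only [decide_eq_true_eq]
  constructor
  · rintro ⟨⟨h1, h2, h3, h4⟩, h5⟩
    refine ⟨by omega, by omega, by omega, by omega, ?_⟩
    rw [show y + d.1 = d.1 + y by omega, show x + d.2 = d.2 + x by omega]
    exact (hstar (d.1 + y, d.2 + x) ⟨h1, h2, h3, h4⟩).1 h5
  · rintro ⟨h1, h2, h3, h4, h5⟩
    refine ⟨⟨by omega, by omega, by omega, by omega⟩, ?_⟩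
    apply (hstar (d.1 + y, d.2 + x) ⟨by omega, by omega, by omega, by omega⟩).2
    rw [show d.1 + y = y + d.1 by omega, show d.2 + x = x + d.2 by omega]
    exact h5

-- ---------- model / board-state lemmas ----------
lemma mem_zfin (N : Int) (B0 : List (List String)) (p : Int × Int) :
    p ∈ zfin N B0 ↔ inGrid N p ∧ getCell B0 p.1 p.2 = "." ∧ cntCell N B0 p.1 p.2 = 0 := by
  simp [zfin, Finset.mem_filter, mem_gridF]

lemma modelC_star (N : Int) (B0 : List (List String)) (V M : Finset (Int × Int)) (p : Int × Int)
    (hV : V ⊆ zfin N B0) (hM : ∀ q ∈ M, BndP N B0 q) :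
    (modelC N B0 V M p = "*") ↔ (getCell B0 p.1 p.2 = "*") := by
  unfold modelC
  split_ifs with h1 h2
  · have := (mem_zfin N B0 p).1 (hV h1)
    constructor
    · intro h; exact absurd h (by decide)
    · intro h; rw [this.2.1] at h; exact absurd h (by decide)
  · have hb := hM p h2
    constructor
    · intro h
      exact absurd h (cntStr_ne_star _ (cntCell_nonneg N B0 p.1 p.2) (cntCell_le8 N B0 p.1 p.2))
    · intro h; rw [hb.2.1] at h; exact absurd h (by decide)
  · rfl

lemma modelC_dot (N : Int) (B0 : List (List String)) (V M : Finset (Int × Int)) (p : Int × Int) :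
    (modelC N B0 V M p = ".") ↔ (p ∉ V ∧ p ∉ M ∧ getCell B0 p.1 p.2 = ".") := by
  unfold modelC
  split_ifs with h1 h2
  · exact ⟨fun h => absurd h (by decide), fun h => absurd h1 h.1⟩
  · exact ⟨fun h => absurd h (cntStr_ne_dot _ (cntCell_nonneg N B0 p.1 p.2) (cntCell_le8 N B0 p.1 p.2)),
           fun h => absurd h2 h.2.1⟩
  · exact ⟨fun h => ⟨h1, h2, h⟩, fun h => h.2.2⟩

lemma BState_check (N : Int) (B0 b : List (List String)) (V M : Finset (Int × Int))
    (hb : BState N B0 b V M) (hV : V ⊆ zfin N B0) (hM : ∀ q ∈ M, BndP N B0 q) (y x : Int) :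
    check_bomb N b y x = cntCell N B0 y x := by
  apply check_bomb_eq_cntCell
  intro q hq
  rw [hb.2.2 q.1 q.2 hq.1 hq.2.2.1]
  exact modelC_star N B0 V M q hV hM

lemma BState_bounds (N : Int) (B0 b : List (List String)) (V M : Finset (Int × Int))
    (hpre : Pre_solution N B0) (hb : BState N B0 b V M) (p : Int × Int) (hg : inGrid N p) :
    p.1.toNat < b.length ∧ p.2.toNat < (b.getD p.1.toNat []).length := by
  obtain ⟨hg1, hg2, hg3, hg4⟩ := hg
  have h1 := hpre.1
  have h2 := pre_row_len N B0 hpre p.1 hg1 hg2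
  have hbl := hb.1
  constructor
  · omega
  · rw [hb.2.1 p.1.toNat]; omega

lemma BState_set_reveal (N : Int) (B0 b : List (List String)) (V M : Finset (Int × Int))
    (hpre : Pre_solution N B0) (hb : BState N B0 b V M) (hV : V ⊆ zfin N B0)
    (hM : ∀ q ∈ M, BndP N B0 q) (p : Int × Int) (hz : p ∈ zfin N B0) :
    BState N B0 (setCell b p.1 p.2 "0") (V ∪ {p}) M := by
  obtain ⟨hg, hdot, hcnt⟩ := (mem_zfin N B0 p).1 hz
  obtain ⟨hbl, hrl, hcells⟩ := hb
  obtain ⟨hyl, hxl⟩ := BState_bounds N B0 b V M hpre ⟨hbl, hrl, hcells⟩ p hg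
  refine ⟨by rw [length_setCell _ _ _ _ hg.1 hg.2.2.1]; exact hbl,
          fun i => by rw [rowlen_setCell _ _ _ _ hg.1 hg.2.2.1]; exact hrl i, ?_⟩
  intro y x hy hx
  rw [getCell_setCell b p.1 p.2 "0" hg.1 hg.2.2.1 hyl hxl y x hy hx]
  by_cases hpq : (y, x) = p
  · rw [if_pos (by rw [← hpq]; exact ⟨rfl, rfl⟩), modelC, if_pos (by simp [hpq])]
  · rw [if_neg (fun hc => hpq (by rw [Prod.ext_iff]; exact ⟨hc.1, hc.2⟩)), hcells y x hy hx]
    unfold modelC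
    have : ((y, x) ∈ V ∪ {p}) ↔ ((y, x) ∈ V) := by
      simp only [Finset.mem_union, Finset.mem_singleton]
      exact ⟨fun h => h.elim id (fun h' => absurd h' hpq), Or.inl⟩
    rw [if_congr this rfl rfl]

lemma BState_set_mark (N : Int) (B0 b : List (List String)) (V M : Finset (Int × Int))
    (hpre : Pre_solution N B0) (hb : BState N B0 b V M) (hV : V ⊆ zfin N B0)
    (hM : ∀ q ∈ M, BndP N B0 q) (p : Int × Int) (hbnd : BndP N B0 p) :
    BState N B0 (setCell b p.1 p.2 (PySem.Int.toStr (cntCell N B0 p.1 p.2))) V (M ∪ {p}) := by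
  obtain ⟨hg, hdot, hcnt⟩ := hbnd
  obtain ⟨hbl, hrl, hcells⟩ := hb
  obtain ⟨hyl, hxl⟩ := BState_bounds N B0 b V M hpre ⟨hbl, hrl, hcells⟩ p hg
  have hpV : p ∉ V := fun hc => hcnt ((mem_zfin N B0 p).1 (hV hc)).2.2
  refine ⟨by rw [length_setCell _ _ _ _ hg.1 hg.2.2.1]; exact hbl,
          fun i => by rw [rowlen_setCell _ _ _ _ hg.1 hg.2.2.1]; exact hrl i, ?_⟩
  intro y x hy hx
  rw [getCell_setCell b p.1 p.2 _ hg.1 hg.2.2.1 hyl hxl y x hy hx]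
  by_cases hpq : (y, x) = p
  · rw [if_pos (by rw [← hpq]; exact ⟨rfl, rfl⟩), modelC, if_neg (by rw [hpq]; exact hpV),
        if_pos (by simp [hpq]), hpq]
  · rw [if_neg (fun hc => hpq (by rw [Prod.ext_iff]; exact ⟨hc.1, hc.2⟩)), hcells y x hy hx]
    unfold modelC
    have : ((y, x) ∈ M ∪ {p}) ↔ ((y, x) ∈ M) := by
      simp only [Finset.mem_union, Finset.mem_singleton]
      exact ⟨fun h => h.elim id (fun h' => absurd h' hpq), Or.inl⟩
    rw [if_congr this rfl rfl]

-- ---------- the BFS queue step over the offset list ----------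
def bfsStepF (N : Int) (c : Int × Int) (qb : List (Int × Int) × List (List String))
    (d : Int × Int) : List (Int × Int) × List (List String) :=
  let ny := d.1 + c.1
  let nx := d.2 + c.2
  if 0 ≤ ny ∧ ny < N ∧ 0 ≤ nx ∧ nx < N ∧ getCell qb.2 ny nx = "." then
    let bc := check_bomb N qb.2 ny nx
    let b' := setCell qb.2 ny nx (PySem.Int.toStr bc)
    (if bc = 0 then qb.1 ++ [(ny, nx)] else qb.1, b')
  else qb

lemma bfsStep_eq (N : Int) (c : Int × Int) (qb : List (Int × Int) × List (List String)) :
    bfsStep N c qb = pvOffsA.foldl (bfsStepF N c) qb := by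
  unfold bfsStep
  rw [← offsA_map, List.foldl_map]
  rfl

lemma bfsFold_spec (N : Int) (B0 : List (List String)) (hpre : Pre_solution N B0) :
    ∀ (L : List (Int × Int)), (∀ d ∈ L, d ∈ pvNbrs) →
    ∀ (c : Int × Int) (q0 : List (Int × Int)) (b : List (List String)) (V M : Finset (Int × Int)),
    BState N B0 b V M → V ⊆ zfin N B0 → (∀ p ∈ M, BndP N B0 p) →
    ∃ (nq : List (Int × Int)) (V' M' : Finset (Int × Int)) (b' : List (List String)),
      L.foldl (bfsStepF N c) (q0, b) = (q0 ++ nq, b') ∧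
      BState N B0 b' V' M' ∧
      V' = V ∪ nq.toFinset ∧ nq.Nodup ∧
      (∀ p ∈ nq, p ∉ V ∧ p ∈ zfin N B0 ∧ adjP c p) ∧
      (∀ d ∈ L, (d.1 + c.1, d.2 + c.2) ∈ zfin N B0 → (d.1 + c.1, d.2 + c.2) ∈ V') ∧
      M ⊆ M' ∧ (∀ p ∈ M', p ∈ M ∨ (BndP N B0 p ∧ adjP c p)) ∧
      (∀ d ∈ L, BndP N B0 (d.1 + c.1, d.2 + c.2) → (d.1 + c.1, d.2 + c.2) ∈ M') := by
  intro L
  induction L with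
  | nil =>
    intro _ c q0 b V M hb hV hM
    exact ⟨[], V, M, b, by simp, hb, by simp, List.nodup_nil, by simp, by simp, le_refl M,
           fun p hp => Or.inl hp, by simp⟩
  | cons d L ih =>
    intro hL c q0 b V M hb hV hM
    have hdN : d ∈ pvNbrs := hL d List.mem_cons_self
    have hLN : ∀ e ∈ L, e ∈ pvNbrs := fun e he => hL e (List.mem_cons_of_mem d he)
    set pd : Int × Int := (d.1 + c.1, d.2 + c.2) with hpd
    rw [List.foldl_cons]
    by_cases hC : 0 ≤ d.1 + c.1 ∧ d.1 + c.1 < N ∧ 0 ≤ d.2 + c.2 ∧ d.2 + c.2 < N ∧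
        getCell b (d.1 + c.1) (d.2 + c.2) = "."
    · -- the neighbour is an unrevealed '.' cell in range: it gets written
      obtain ⟨h1, h2, h3, h4, h5⟩ := hC
      have hg : inGrid N pd := ⟨h1, h2, h3, h4⟩
      have hmod : modelC N B0 V M pd = "." := by
        rw [← hb.2.2 (d.1 + c.1) (d.2 + c.2) h1 h3]; exact h5
      obtain ⟨hpV, hpM, hporig⟩ := (modelC_dot N B0 V M pd).1 hmod
      have hcb : check_bomb N b (d.1 + c.1) (d.2 + c.2) = cntCell N B0 (d.1 + c.1) (d.2 + c.2) :=
        BState_check N B0 b V M hb hV hM _ _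
      have hstep : bfsStepF N c (q0, b) d =
          (if cntCell N B0 (d.1 + c.1) (d.2 + c.2) = 0 then q0 ++ [pd] else q0,
           setCell b (d.1 + c.1) (d.2 + c.2)
             (PySem.Int.toStr (cntCell N B0 (d.1 + c.1) (d.2 + c.2)))) := by
        unfold bfsStepF
        rw [if_pos ⟨h1, h2, h3, h4, h5⟩, hcb]
      by_cases hbc : cntCell N B0 (d.1 + c.1) (d.2 + c.2) = 0
      · -- a fresh zero cell: revealed as "0" and enqueued
        have hz : pd ∈ zfin N B0 := (mem_zfin N B0 pd).2 ⟨hg, hporig, hbc⟩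
        have hb1 : BState N B0 (setCell b (d.1 + c.1) (d.2 + c.2) "0") (V ∪ {pd}) M := by
          have := BState_set_reveal N B0 b V M hpre hb hV hM pd hz
          rwa [] at this
        rw [hstep, if_pos hbc, hbc]
        rw [show PySem.Int.toStr 0 = "0" from by decide]
        obtain ⟨nq', V', M', b', heq, hb', hV', hnd', hprops', hclos', hMsub', hMchar', hMclos'⟩ :=
          ih hLN c (q0 ++ [pd]) _ (V ∪ {pd}) M hb1
            (Finset.union_subset hV (by simpa using hz)) hM
        refine ⟨pd :: nq', V', M', b', ?_, hb', ?_, ?_, ?_, ?_, hMsub', ?_, ?_⟩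
        · rw [heq, List.append_assoc]; rfl
        · rw [hV']; apply Finset.ext; intro q
          simp only [Finset.mem_union, List.toFinset_cons, Finset.mem_insert,
            Finset.mem_singleton, List.mem_toFinset]
          tauto
        · refine List.Nodup.cons ?_ hnd'
          intro hc
          exact (hprops' pd hc).1 (Finset.mem_union_right V (Finset.mem_singleton_self pd))
        · intro p hp
          rcases List.mem_cons.1 hp with rfl | hp'
          · refine ⟨hpV, hz, ?_⟩
            unfold adjP
            have : (pd.1 - c.1, pd.2 - c.2) = d := by
              rw [hpd]; apply Prod.ext <;> simp <;> ring
            rw [this]; exact hdN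
          · obtain ⟨hnV, hz', ha⟩ := hprops' p hp'
            exact ⟨fun hc => hnV (Finset.mem_union_left _ hc), hz', ha⟩
        · intro e he hez
          rcases List.mem_cons.1 he with rfl | he'
          · rw [hV']
            exact Finset.mem_union_left _ (Finset.mem_union_right _ (Finset.mem_singleton_self _))
          · exact hclos' e he' hez
        · exact hMchar'
        · intro e he hbnd
          rcases List.mem_cons.1 he with rfl | he'
          · exact absurd hbc hbnd.2.2
          · exact hMclos' e he' hbnd
      · -- a numbered boundary cell: written with its count, not enqueued
        have hbnd : BndP N B0 pd := ⟨hg, hporig, hbc⟩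
        have hb1 : BState N B0
            (setCell b (d.1 + c.1) (d.2 + c.2)
              (PySem.Int.toStr (cntCell N B0 (d.1 + c.1) (d.2 + c.2)))) V (M ∪ {pd}) :=
          BState_set_mark N B0 b V M hpre hb hV hM pd hbnd
        rw [hstep, if_neg hbc]
        obtain ⟨nq', V', M', b', heq, hb', hV', hnd', hprops', hclos', hMsub', hMchar', hMclos'⟩ :=
          ih hLN c q0 _ V (M ∪ {pd}) hb1 hV
            (fun q hq => (Finset.mem_union.1 hq).elim (hM q)
              (fun hq' => by rw [Finset.mem_singleton.1 hq']; exact hbnd))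
        refine ⟨nq', V', M', b', heq, hb', hV', hnd', hprops', ?_, ?_, ?_, ?_⟩
        · intro e he hez
          rcases List.mem_cons.1 he with rfl | he'
          · exact absurd ((mem_zfin N B0 _).1 hez).2.2 hbc
          · exact hclos' e he' hez
        · exact Finset.Subset.trans Finset.subset_union_left hMsub'
        · intro p hp
          rcases hMchar' p hp with hp' | hp'
          · rcases Finset.mem_union.1 hp' with h | h
            · exact Or.inl h
            · have hp_eq := Finset.mem_singleton.1 h
              subst hp_eq
              refine Or.inr ⟨hbnd, ?_⟩
              unfold adjP
              have : (pd.1 - c.1, pd.2 - c.2) = d := by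
                rw [hpd]; apply Prod.ext <;> simp <;> ring
              rw [this]; exact hdN
          · exact Or.inr hp'
        · intro e he hbnd'
          rcases List.mem_cons.1 he with rfl | he'
          · exact hMsub' (Finset.mem_union_right _ (Finset.mem_singleton_self _))
          · exact hMclos' e he' hbnd'
    · -- nothing happens at this neighbour
      have hstep : bfsStepF N c (q0, b) d = (q0, b) := by
        unfold bfsStepF; rw [if_neg hC]
      rw [hstep]
      obtain ⟨nq', V', M', b', heq, hb', hV', hnd', hprops', hclos', hMsub', hMchar', hMclos'⟩ :=
        ih hLN c q0 b V M hb hV hM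
      refine ⟨nq', V', M', b', heq, hb', hV', hnd', hprops', ?_, hMsub', hMchar', ?_⟩
      · intro e he hez
        rcases List.mem_cons.1 he with rfl | he'
        · -- the cell is in zfin but the guard failed: it must already be revealed or marked
          obtain ⟨hg, horig, hcnt⟩ := (mem_zfin N B0 _).1 hez
          have hy : (0:Int) ≤ e.1 + c.1 := hg.1
          have hx : (0:Int) ≤ e.2 + c.2 := hg.2.2.1
          have hcell := hb.2.2 (e.1 + c.1) (e.2 + c.2) hy hx
          by_cases hmem : ((e.1 + c.1, e.2 + c.2) : Int × Int) ∈ V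
          · rw [hV']; exact Finset.mem_union_left _ hmem
          · by_cases hmem2 : ((e.1 + c.1, e.2 + c.2) : Int × Int) ∈ M
            · exact absurd hcnt (hM _ hmem2).2.2
            · exfalso
              apply hC
              refine ⟨hg.1, hg.2.1, hg.2.2.1, hg.2.2.2, ?_⟩
              rw [hcell]
              exact (modelC_dot N B0 V M _).2 ⟨hmem, hmem2, horig⟩
        · exact hclos' e he' hez
      · intro e he hbnd
        rcases List.mem_cons.1 he with rfl | he'
        · obtain ⟨hg, horig, hcnt⟩ := hbnd
          have hcell := hb.2.2 (e.1 + c.1) (e.2 + c.2) hg.1 hg.2.2.1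
          by_cases hmem : ((e.1 + c.1, e.2 + c.2) : Int × Int) ∈ V
          · exact absurd ((mem_zfin N B0 _).1 (hV hmem)).2.2 hcnt
          · by_cases hmem2 : ((e.1 + c.1, e.2 + c.2) : Int × Int) ∈ M
            · exact hMsub' hmem2
            · exfalso
              apply hC
              refine ⟨hg.1, hg.2.1, hg.2.2.1, hg.2.2.2, ?_⟩
              rw [hcell]
              exact (modelC_dot N B0 V M _).2 ⟨hmem, hmem2, horig⟩
        · exact hMclos' e he' hbnd

lemma bfsLoop_spec (N : Int) (B0 : List (List String)) (hpre : Pre_solution N B0) :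
    ∀ (fuel : Nat) (Q : List (Int × Int)) (b : List (List String)) (V D M : Finset (Int × Int)),
    BState N B0 b V M → Q.Nodup → (∀ p ∈ Q, p ∉ D) → V = D ∪ Q.toFinset → V ⊆ zfin N B0 →
    (∀ p ∈ M, BndP N B0 p) → (∀ p ∈ M, ∃ q ∈ D, adjP q p) →
    (∀ q ∈ D, ∀ p ∈ zfin N B0, adjP q p → p ∈ V) →
    (∀ q ∈ D, ∀ p, BndP N B0 p → adjP q p → p ∈ M) →
    Q.length + ((zfin N B0) \ V).card ≤ fuel →
    ∃ (W MW : Finset (Int × Int)),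
      BState N B0 (bfsLoop N fuel Q b) W MW ∧
      V ⊆ W ∧ W ⊆ zfin N B0 ∧
      (∀ p ∈ W, p ∈ V ∨ ∃ s ∈ Q, Relation.ReflTransGen (relZ N B0) s p) ∧
      (∀ q ∈ W, ∀ p ∈ zfin N B0, adjP q p → p ∈ W) ∧
      (∀ p, p ∈ MW ↔ BndP N B0 p ∧ ∃ q ∈ W, adjP q p) := by
  intro fuel
  induction fuel with
  | zero =>
    intro Q b V D M hb hnd hQD hVD hVz hMb hMadj hDcl hMcl hfuel
    have hQ : Q = [] := by
      cases Q with
      | nil => rfl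
      | cons c rest => simp at hfuel
    subst hQ
    have hVDeq : V = D := by rw [hVD]; simp
    refine ⟨V, M, hb, le_refl V, hVz, fun p hp => Or.inl hp, ?_, ?_⟩
    · intro q hq p hp ha; rw [hVDeq] at hq; exact hDcl q hq p hp ha
    · intro p
      constructor
      · intro hp; exact ⟨hMb p hp, by rw [hVDeq] at *; exact hMadj p hp⟩
      · rintro ⟨hbnd, q, hq, ha⟩
        rw [hVDeq] at hq
        exact hMcl q hq p hbnd ha
  | succ fuel ih =>
    intro Q b V D M hb hnd hQD hVD hVz hMb hMadj hDcl hMcl hfuel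
    cases Q with
    | nil =>
      have hVDeq : V = D := by rw [hVD]; simp
      refine ⟨V, M, hb, le_refl V, hVz, fun p hp => Or.inl hp, ?_, ?_⟩
      · intro q hq p hp ha; rw [hVDeq] at hq; exact hDcl q hq p hp ha
      · intro p
        constructor
        · intro hp; exact ⟨hMb p hp, by rw [hVDeq] at *; exact hMadj p hp⟩
        · rintro ⟨hbnd, q, hq, ha⟩
          rw [hVDeq] at hq
          exact hMcl q hq p hbnd ha
    | cons c rest =>
      have hcV : c ∈ V := by
        rw [hVD]; exact Finset.mem_union_right _ (by simp)
      show ∃ W MW, BState N B0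
        (bfsLoop N fuel (bfsStep N c (rest, b)).1 (bfsStep N c (rest, b)).2) W MW ∧ _
      rw [bfsStep_eq]
      obtain ⟨nq, V₁, M₁, b₁, heq, hb₁, hV₁, hnd₁, hprops, hclos, hMsub, hMchar, hMclos⟩ :=
        bfsFold_spec N B0 hpre pvOffsA (fun d hd => (mem_offsA_iff d).1 hd) c rest b V M hb hVz hMb
      rw [heq]
      have hrestV : ∀ p ∈ rest, p ∈ V := by
        intro p hp; rw [hVD]; exact Finset.mem_union_right _ (by simp [hp])
      have hnqzV : ∀ p ∈ nq, p ∉ V ∧ p ∈ zfin N B0 ∧ adjP c p := hprops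
      have hndrest : rest.Nodup := hnd.of_cons
      have hcrest : c ∉ rest := (List.nodup_cons.1 hnd).1
      have hV₁sub : V ⊆ V₁ := by rw [hV₁]; exact Finset.subset_union_left
      have hadj_of_mem : ∀ p : Int × Int, adjP c p →
          ∃ d ∈ pvOffsA, p = (d.1 + c.1, d.2 + c.2) := by
        intro p ha
        refine ⟨(p.1 - c.1, p.2 - c.2), (mem_offsA_iff _).2 ha, ?_⟩
        apply Prod.ext <;> simp <;> ring
      have hnq_sub : nq.toFinset ⊆ (zfin N B0) \ V := by
        intro p hp
        rw [List.mem_toFinset] at hp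
        exact Finset.mem_sdiff.2 ⟨(hprops p hp).2.1, (hprops p hp).1⟩
      have hcard : ((zfin N B0) \ V₁).card = ((zfin N B0) \ V).card - nq.length := by
        have hset : (zfin N B0) \ V₁ = ((zfin N B0) \ V) \ nq.toFinset := by
          apply Finset.ext; intro q
          rw [hV₁]
          simp only [Finset.mem_sdiff, Finset.mem_union, List.mem_toFinset]
          tauto
        rw [hset, Finset.card_sdiff, Finset.inter_eq_left.2 hnq_sub,
            List.toFinset_card_of_nodup hnd₁]
      have hnqlen : nq.length ≤ ((zfin N B0) \ V).card := by
        have := Finset.card_le_card hnq_sub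
        rw [List.toFinset_card_of_nodup hnd₁] at this
        exact this
      obtain ⟨W, MW, hbW, hVW, hWz, hsound, hWcl, hMWchar⟩ :=
        ih (rest ++ nq) b₁ V₁ (D ∪ {c}) M₁ hb₁
          (by
            rw [List.nodup_append]
            exact ⟨hndrest, hnd₁, fun a ha b hb heq => (hprops b hb).1 (heq ▸ hrestV a ha)⟩)
          (by
            intro p hp
            rcases List.mem_append.1 hp with h | h
            · intro hc2
              rcases Finset.mem_union.1 hc2 with h' | h'
              · exact hQD p (List.mem_cons_of_mem c h) h'
              · exact hcrest (by rwa [Finset.mem_singleton.1 h'] at h)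
            · intro hc2
              apply (hprops p h).1
              rcases Finset.mem_union.1 hc2 with h' | h'
              · rw [hVD]; exact Finset.mem_union_left _ h'
              · rw [Finset.mem_singleton.1 h']; exact hcV)
          (by
            rw [hV₁, hVD]
            apply Finset.ext; intro q
            simp only [Finset.mem_union, List.toFinset_cons, Finset.mem_insert,
              List.mem_toFinset, List.mem_append, Finset.mem_singleton]
            tauto)
          (by
            rw [hV₁]
            apply Finset.union_subset hVz
            intro p hp
            exact (hprops p (List.mem_toFinset.1 hp)).2.1)
          (by
            intro p hp
            rcases hMchar p hp with h | h
            · exact hMb p h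
            · exact h.1)
          (by
            intro p hp
            rcases hMchar p hp with h | h
            · obtain ⟨q, hq, ha⟩ := hMadj p h
              exact ⟨q, Finset.mem_union_left _ hq, ha⟩
            · exact ⟨c, Finset.mem_union_right _ (Finset.mem_singleton_self c), h.2⟩)
          (by
            intro q hq p hp ha
            rcases Finset.mem_union.1 hq with h | h
            · exact hV₁sub (hDcl q h p hp ha)
            · rw [Finset.mem_singleton.1 h] at ha
              obtain ⟨d, hd, hpd⟩ := hadj_of_mem p ha
              rw [hpd]
              exact hclos d hd (by rwa [← hpd]))
          (by
            intro q hq p hbnd ha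
            rcases Finset.mem_union.1 hq with h | h
            · exact hMsub (hMcl q h p hbnd ha)
            · rw [Finset.mem_singleton.1 h] at ha
              obtain ⟨d, hd, hpd⟩ := hadj_of_mem p ha
              rw [hpd]
              exact hMclos d hd (by rwa [← hpd]))
          (by
            rw [List.length_append, hcard]
            simp only [List.length_cons] at hfuel
            omega)
      refine ⟨W, MW, hbW, Finset.Subset.trans hV₁sub hVW, hWz, ?_, hWcl, hMWchar⟩
      intro p hp
      rcases hsound p hp with h | ⟨s, hs, hreach⟩
      · rw [hV₁] at h
        rcases Finset.mem_union.1 h with h' | h'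
        · exact Or.inl h'
        · refine Or.inr ⟨c, List.mem_cons_self, ?_⟩
          have := hprops p (List.mem_toFinset.1 h')
          exact Relation.ReflTransGen.single ⟨this.2.1, this.2.2⟩
      · rcases List.mem_append.1 hs with h' | h'
        · exact Or.inr ⟨s, List.mem_cons_of_mem c h', hreach⟩
        · refine Or.inr ⟨c, List.mem_cons_self, ?_⟩
          have := hprops s h'
          exact Relation.ReflTransGen.head ⟨this.2.1, this.2.2⟩ hreach

lemma scanPairs_length (N : Int) : (scanPairs N).length = N.toNat * N.toNat := by
  simp only [scanPairs, List.length_flatMap, List.length_map]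
  rw [List.map_const', List.sum_replicate, smul_eq_mul, PySem.List.length_pyRange_one]
  simp

lemma zfin_card_le (N : Int) (B0 : List (List String)) :
    (zfin N B0).card ≤ N.toNat * N.toNat := by
  calc (zfin N B0).card ≤ (gridF N).card := Finset.card_le_card (Finset.filter_subset _ _)
    _ ≤ (scanPairs N).length := List.toFinset_card_le _
    _ = N.toNat * N.toNat := scanPairs_length N

lemma bfs_spec (N : Int) (B0 : List (List String)) (hpre : Pre_solution N B0)
    (b : List (List String)) (W : Finset (Int × Int)) (hGood : GoodS N B0 b W)
    (p : Int × Int) (hz : p ∈ zfin N B0) (hpW : p ∉ W) :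
    ∃ W', GoodS N B0 (bfs N b p.1 p.2) W' ∧
      ∀ q, q ∈ W' ↔ q ∈ W ∨ (q ∈ zfin N B0 ∧ Relation.ReflTransGen (relZ N B0) p q) := by
  obtain ⟨hWz, hWcl, M, hb, hMchar⟩ := hGood
  have hMb : ∀ q ∈ M, BndP N B0 q := fun q hq => ((hMchar q).1 hq).1
  have hb1 : BState N B0 (setCell b p.1 p.2 "0") (W ∪ {p}) M :=
    BState_set_reveal N B0 b W M hpre hb hWz hMb p hz
  obtain ⟨W', MW, hbW, hVW, hWz', hsound, hWcl', hMWchar⟩ :=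
    bfsLoop_spec N B0 hpre (N.toNat * N.toNat + 1) [p] (setCell b p.1 p.2 "0")
      (W ∪ {p}) W M hb1
      (List.nodup_singleton p)
      (by intro q hq; rw [List.mem_singleton.1 hq]; exact hpW)
      (by apply Finset.ext; intro q; simp)
      (Finset.union_subset hWz (by simpa using hz))
      hMb
      (fun q hq => ((hMchar q).1 hq).2)
      (fun q hq r hr ha => Finset.mem_union_left _ (hWcl q hq r hr ha))
      (fun q hq r hbnd ha => (hMchar r).2 ⟨hbnd, q, hq, ha⟩)
      (by
        have h1 := zfin_card_le N B0
        have h2 : ((zfin N B0) \ (W ∪ {p})).card ≤ (zfin N B0).card :=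
          Finset.card_le_card (Finset.sdiff_subset)
        simp only [List.length_singleton]
        omega)
  refine ⟨W', ⟨hWz', hWcl', MW, hbW, hMWchar⟩, ?_⟩
  intro q
  constructor
  · intro hq
    rcases hsound q hq with h | ⟨s, hs, hreach⟩
    · rcases Finset.mem_union.1 h with h' | h'
      · exact Or.inl h'
      · rw [Finset.mem_singleton.1 h']
        exact Or.inr ⟨hz, Relation.ReflTransGen.refl⟩
    · rw [List.mem_singleton.1 hs] at hreach
      exact Or.inr ⟨hWz' hq, hreach⟩
  · intro hq
    rcases hq with h | ⟨hqz, hreach⟩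
    · exact hVW (Finset.mem_union_left _ h)
    · clear hqz
      induction hreach with
      | refl => exact hVW (Finset.mem_union_right _ (Finset.mem_singleton_self p))
      | tail hab hrel ihq => exact hWcl' _ ihq _ hrel.1 hrel.2

-- ---------- B-side: zero set, count table, DFS flood fill ----------
lemma mem_scanPairs (N : Int) (p : Int × Int) : p ∈ scanPairs N ↔ inGrid N p := by
  rw [← mem_gridF, gridF, List.mem_toFinset]

lemma cntLookup (N : Int) (B0 : List (List String)) (y x : Int) (hg : inGrid N (y, x)) :
    PySem.List.pyGetD (PySem.List.pyGetD (cntTable N B0) y []) x 0 = cntCell N B0 y x := by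
  unfold cntTable
  rw [PySem.List.pyGetD_map_pyRange_of_nonneg _ _ _ _ hg.1 hg.2.1,
      PySem.List.pyGetD_map_pyRange_of_nonneg _ _ _ _ hg.2.2.1 hg.2.2.2]

lemma mem_zeroSet (N : Int) (B0 : List (List String)) (p : Int × Int) :
    p ∈ zeroSet N B0 ↔ p ∈ zfin N B0 := by
  unfold zeroSet
  rw [PySem.Set.mem_ofList, mem_zfin]
  simp only [List.mem_flatMap, List.mem_map, List.mem_filter, PySem.List.mem_pyRange_one,
    decide_eq_true_eq]
  constructor
  · rintro ⟨y, ⟨h1, h2⟩, x, ⟨⟨h3, h4⟩, hdot, hcnt⟩, rfl⟩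
    rw [cntLookup N B0 y x ⟨h1, h2, h3, h4⟩] at hcnt
    exact ⟨⟨h1, h2, h3, h4⟩, hdot, hcnt⟩
  · rintro ⟨hg, hdot, hcnt⟩
    refine ⟨p.1, ⟨hg.1, hg.2.1⟩, p.2, ⟨⟨hg.2.2.1, hg.2.2.2⟩, ?_, ?_⟩, rfl⟩
    · exact hdot
    · rw [cntLookup N B0 p.1 p.2 ⟨hg.1, hg.2.1, hg.2.2.1, hg.2.2.2⟩]; exact hcnt

lemma dfsFold_spec (zero : List (Int × Int)) :
    ∀ (L : List (Int × Int)), (∀ d ∈ L, d ∈ pvNbrs) →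
    ∀ (c : Int × Int) (seen stk : List (Int × Int)),
    ∃ nq : List (Int × Int),
      L.foldl (dfsStepF zero c) (seen, stk) = (seen ++ nq, nq.reverse ++ stk) ∧
      nq.Nodup ∧ (∀ p ∈ nq, p ∉ seen ∧ p ∈ zero ∧ adjP c p) ∧
      (∀ d ∈ L, (c.1 + d.1, c.2 + d.2) ∈ zero → (c.1 + d.1, c.2 + d.2) ∈ seen ++ nq) := by
  intro L
  induction L with
  | nil =>
    intro _ c seen stk
    exact ⟨[], by simp, List.nodup_nil, by simp, by simp⟩
  | cons d L ih =>
    intro hL c seen stk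
    have hdN : d ∈ pvNbrs := hL d List.mem_cons_self
    have hLN : ∀ e ∈ L, e ∈ pvNbrs := fun e he => hL e (List.mem_cons_of_mem d he)
    set q : Int × Int := (c.1 + d.1, c.2 + d.2) with hq
    rw [List.foldl_cons]
    by_cases hC : q ∈ zero ∧ ¬ q ∈ seen
    · have hstep : dfsStepF zero c (seen, stk) d = (seen ++ [q], q :: stk) := by
        unfold dfsStepF
        rw [if_pos hC, PySem.Set.add_of_not_mem hC.2]
      rw [hstep]
      obtain ⟨nq', heq, hnd', hprops', hclos'⟩ := ih hLN c (seen ++ [q]) (q :: stk)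
      refine ⟨q :: nq', ?_, ?_, ?_, ?_⟩
      · rw [heq, List.reverse_cons, List.append_assoc, List.append_assoc]
        simp
      · refine List.Nodup.cons ?_ hnd'
        intro hc
        exact (hprops' q hc).1 (List.mem_append_right seen (List.mem_singleton_self q))
      · intro p hp
        rcases List.mem_cons.1 hp with rfl | hp'
        · refine ⟨hC.2, hC.1, ?_⟩
          unfold adjP
          have hqd : (q.1 - c.1, q.2 - c.2) = d := by
            rw [hq]; apply Prod.ext <;> simp
          rw [hqd]; exact hdN
        · obtain ⟨hns, hz, ha⟩ := hprops' p hp'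
          exact ⟨fun hc => hns (List.mem_append_left _ hc), hz, ha⟩
      · intro e he hez
        rcases List.mem_cons.1 he with rfl | he'
        · exact List.mem_append_right _ List.mem_cons_self
        · have := hclos' e he' hez
          rwa [List.append_assoc] at this
    · have hstep : dfsStepF zero c (seen, stk) d = (seen, stk) := by
        unfold dfsStepF; rw [if_neg hC]
      rw [hstep]
      obtain ⟨nq', heq, hnd', hprops', hclos'⟩ := ih hLN c seen stk
      refine ⟨nq', heq, hnd', hprops', ?_⟩
      intro e he hez
      rcases List.mem_cons.1 he with rfl | he'
      · rcases not_and_or.1 hC with h | h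
        · exact absurd hez h
        · exact List.mem_append_left _ (not_not.1 h)
      · exact hclos' e he' hez

lemma dfsLoop_spec (N : Int) (B0 : List (List String)) (zero : List (Int × Int))
    (hziff : ∀ p, p ∈ zero ↔ p ∈ zfin N B0) :
    ∀ (fuel : Nat) (stk seen : List (Int × Int)),
    seen.Nodup → stk.Nodup → (∀ p ∈ stk, p ∈ seen) →
    (∀ p ∈ seen, p ∈ zfin N B0) →
    (∀ p ∈ seen, p ∉ stk → ∀ q ∈ zfin N B0, adjP p q → q ∈ seen) →
    stk.length + ((zfin N B0) \ seen.toFinset).card ≤ fuel →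
    (dfsLoop zero fuel stk seen).Nodup ∧
    (∀ p ∈ seen, p ∈ dfsLoop zero fuel stk seen) ∧
    (∀ p ∈ dfsLoop zero fuel stk seen, p ∈ zfin N B0) ∧
    (∀ p ∈ dfsLoop zero fuel stk seen,
      p ∈ seen ∨ ∃ s ∈ stk, Relation.ReflTransGen (relZ N B0) s p) ∧
    (∀ p ∈ dfsLoop zero fuel stk seen, ∀ q ∈ zfin N B0, adjP p q →
      q ∈ dfsLoop zero fuel stk seen) := by
  intro fuel
  induction fuel with
  | zero =>
    intro stk seen hnds hndk hks hsz hcl hfuel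
    have hstk : stk = [] := by
      cases stk with
      | nil => rfl
      | cons c rest => simp at hfuel
    subst hstk
    show (dfsLoop zero 0 [] seen).Nodup ∧ _
    refine ⟨hnds, fun p hp => hp, hsz, fun p hp => Or.inl hp, ?_⟩
    intro p hp q hqz ha
    exact hcl p hp (List.not_mem_nil) q hqz ha
  | succ fuel ih =>
    intro stk seen hnds hndk hks hsz hcl hfuel
    cases stk with
    | nil =>
      refine ⟨hnds, fun p hp => hp, hsz, fun p hp => Or.inl hp, ?_⟩
      intro p hp q hqz ha
      exact hcl p hp (List.not_mem_nil) q hqz ha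
    | cons c rest =>
      obtain ⟨nq, heq, hnd₁, hprops, hclos⟩ :=
        dfsFold_spec zero pvNbrs (fun d hd => hd) c seen rest
      have hstep : dfsLoop zero (fuel + 1) (c :: rest) seen =
          dfsLoop zero fuel (nq.reverse ++ rest) (seen ++ nq) := by
        show dfsLoop zero fuel (pvNbrs.foldl (dfsStepF zero c) (seen, rest)).2
          (pvNbrs.foldl (dfsStepF zero c) (seen, rest)).1 = _
        rw [heq]
      have hcseen : c ∈ seen := hks c List.mem_cons_self
      have hrest_seen : ∀ p ∈ rest, p ∈ seen := fun p hp => hks p (List.mem_cons_of_mem c hp)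
      have hnq_sub : nq.toFinset ⊆ (zfin N B0) \ seen.toFinset := by
        intro p hp
        rw [List.mem_toFinset] at hp
        refine Finset.mem_sdiff.2 ⟨(hziff p).1 (hprops p hp).2.1, ?_⟩
        rw [List.mem_toFinset]
        exact (hprops p hp).1
      have hadj_of_mem : ∀ p : Int × Int, adjP c p →
          ∃ d ∈ pvNbrs, p = (c.1 + d.1, c.2 + d.2) := by
        intro p ha
        refine ⟨(p.1 - c.1, p.2 - c.2), ha, ?_⟩
        apply Prod.ext <;> simp
      rw [hstep]
      have hmain := ih (nq.reverse ++ rest) (seen ++ nq)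
        (by
          rw [List.nodup_append]
          exact ⟨hnds, hnd₁, fun a ha b hb heqq => (hprops b hb).1 (heqq ▸ ha)⟩)
        (by
          rw [List.nodup_append]
          refine ⟨List.nodup_reverse.2 hnd₁, hndk.of_cons, ?_⟩
          intro a ha b hb heqq
          exact (hprops a (List.mem_reverse.1 ha)).1 (by rw [heqq]; exact hrest_seen b hb))
        (by
          intro p hp
          rcases List.mem_append.1 hp with h | h
          · exact List.mem_append_right _ (List.mem_reverse.1 h)
          · exact List.mem_append_left _ (hrest_seen p h))
        (by
          intro p hp
          rcases List.mem_append.1 hp with h | h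
          · exact hsz p h
          · exact (hziff p).1 (hprops p h).2.1)
        (by
          intro p hp hpstk q hqz ha
          rcases List.mem_append.1 hp with h | h
          · by_cases hpc : p = c
            · subst hpc
              obtain ⟨d, hd, hqd⟩ := hadj_of_mem q ha
              rw [hqd]
              exact hclos d hd (by rw [← hqd]; exact (hziff q).2 hqz)
            · have hpr : p ∉ rest := fun hc => hpstk (List.mem_append_right _ hc)
              have : p ∉ (c :: rest) := by
                intro hc
                rcases List.mem_cons.1 hc with h' | h'
                · exact hpc h'
                · exact hpr h'
              exact List.mem_append_left _ (hcl p h this q hqz ha)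
          · exact absurd (List.mem_append_left rest (List.mem_reverse.2 h)) hpstk)
        (by
          have hcard : ((zfin N B0) \ (seen ++ nq).toFinset).card =
              ((zfin N B0) \ seen.toFinset).card - nq.length := by
            have hset : (zfin N B0) \ (seen ++ nq).toFinset =
                ((zfin N B0) \ seen.toFinset) \ nq.toFinset := by
              apply Finset.ext; intro q
              simp only [Finset.mem_sdiff, List.toFinset_append, Finset.mem_union,
                List.mem_toFinset]
              tauto
            rw [hset, Finset.card_sdiff, Finset.inter_eq_left.2 hnq_sub,
                List.toFinset_card_of_nodup hnd₁]
          have hnqlen : nq.length ≤ ((zfin N B0) \ seen.toFinset).card := by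
            have := Finset.card_le_card hnq_sub
            rwa [List.toFinset_card_of_nodup hnd₁] at this
          rw [List.length_append, List.length_reverse, hcard]
          simp only [List.length_cons] at hfuel
          omega)
      obtain ⟨h1, h2, h3, h4, h5⟩ := hmain
      refine ⟨h1, fun p hp => h2 p (List.mem_append_left _ hp), h3, ?_, h5⟩
      intro p hp
      rcases h4 p hp with h | ⟨s, hs, hreach⟩
      · rcases List.mem_append.1 h with h' | h'
        · exact Or.inl h'
        · refine Or.inr ⟨c, List.mem_cons_self, Relation.ReflTransGen.single ?_⟩
          exact ⟨(hziff p).1 (hprops p h').2.1, (hprops p h').2.2⟩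
      · rcases List.mem_append.1 hs with h' | h'
        · refine Or.inr ⟨c, List.mem_cons_self, Relation.ReflTransGen.head ?_ hreach⟩
          have := hprops s (List.mem_reverse.1 h')
          exact ⟨(hziff s).1 this.2.1, this.2.2⟩
        · exact Or.inr ⟨s, List.mem_cons_of_mem c h', hreach⟩

lemma dfs_spec (N : Int) (B0 : List (List String)) (zero : List (Int × Int))
    (hziff : ∀ p, p ∈ zero ↔ p ∈ zfin N B0) (seen : List (Int × Int))
    (hnd : seen.Nodup) (hsz : ∀ p ∈ seen, p ∈ zfin N B0)
    (hcl : ∀ p ∈ seen, ∀ q ∈ zfin N B0, adjP p q → q ∈ seen)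
    (p : Int × Int) (hp : p ∈ zfin N B0) (hps : p ∉ seen) :
    (dfsLoop zero (N.toNat * N.toNat + 1) [p] (PySem.Set.add seen p)).Nodup ∧
    (∀ q ∈ dfsLoop zero (N.toNat * N.toNat + 1) [p] (PySem.Set.add seen p), q ∈ zfin N B0) ∧
    (∀ q ∈ dfsLoop zero (N.toNat * N.toNat + 1) [p] (PySem.Set.add seen p),
      ∀ q' ∈ zfin N B0, adjP q q' →
        q' ∈ dfsLoop zero (N.toNat * N.toNat + 1) [p] (PySem.Set.add seen p)) ∧
    (∀ q, q ∈ dfsLoop zero (N.toNat * N.toNat + 1) [p] (PySem.Set.add seen p) ↔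
      q ∈ seen ∨ (q ∈ zfin N B0 ∧ Relation.ReflTransGen (relZ N B0) p q)) := by
  rw [PySem.Set.add_of_not_mem hps]
  obtain ⟨h1, h2, h3, h4, h5⟩ := dfsLoop_spec N B0 zero hziff (N.toNat * N.toNat + 1)
    [p] (seen ++ [p])
    (by
      rw [List.nodup_append]
      exact ⟨hnd, List.nodup_singleton p, fun a ha b hb heq =>
        hps ((List.mem_singleton.1 hb) ▸ heq ▸ ha)⟩)
    (List.nodup_singleton p)
    (fun q hq => List.mem_append_right _ hq)
    (by
      intro q hq
      rcases List.mem_append.1 hq with h | h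
      · exact hsz q h
      · rw [List.mem_singleton.1 h]; exact hp)
    (by
      intro q hq hqs q' hq' ha
      rcases List.mem_append.1 hq with h | h
      · exact List.mem_append_left _ (hcl q h q' hq' ha)
      · exact absurd (by rw [List.mem_singleton.1 h]; exact List.mem_singleton_self p : q ∈ [p]) hqs)
    (by
      have hc1 := zfin_card_le N B0
      have hc2 : ((zfin N B0) \ (seen ++ [p]).toFinset).card ≤ (zfin N B0).card :=
        Finset.card_le_card (Finset.sdiff_subset)
      simp only [List.length_singleton]
      omega)
  refine ⟨h1, h3, h5, ?_⟩
  intro q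
  constructor
  · intro hq
    rcases h4 q hq with h | ⟨s, hs, hreach⟩
    · rcases List.mem_append.1 h with h' | h'
      · exact Or.inl h'
      · rw [List.mem_singleton.1 h']
        exact Or.inr ⟨hp, Relation.ReflTransGen.refl⟩
    · rw [List.mem_singleton.1 hs] at hreach
      exact Or.inr ⟨h3 q hq, hreach⟩
  · intro hq
    rcases hq with h | ⟨hqz, hreach⟩
    · exact h2 q (List.mem_append_left _ h)
    · clear hqz
      induction hreach with
      | refl => exact h2 p (List.mem_append_right _ (List.mem_singleton_self p))
      | tail hab hrel ihq => exact h5 _ ihq _ hrel.1 hrel.2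

-- ---------- the two first phases implement the same scan ----------
def stepA (N : Int) (st : Int × List (List String)) (p : Int × Int) :
    Int × List (List String) :=
  if getCell st.2 p.1 p.2 = "." ∧ check_bomb N st.2 p.1 p.2 = 0 then
    (st.1 + 1, bfs N st.2 p.1 p.2)
  else st

def stepB (N : Int) (zero : List (Int × Int)) (st : Int × PySem.Set (Int × Int))
    (p : Int × Int) : Int × PySem.Set (Int × Int) :=
  if p ∈ zero ∧ ¬ p ∈ st.2 then
    (st.1 + 1, dfsLoop zero (N.toNat * N.toNat + 1) [p] (PySem.Set.add st.2 p))
  else st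

lemma foldl_nested {σ : Type} (ys xs : List Int) (f : σ → (Int × Int) → σ) (init : σ) :
    ys.foldl (fun st y => xs.foldl (fun st x => f st (y, x)) st) init
      = (ys.flatMap (fun y => xs.map (fun x => (y, x)))).foldl f init := by
  induction ys generalizing init with
  | nil => rfl
  | cons y ys ih =>
    rw [List.foldl_cons, List.flatMap_cons, List.foldl_append, List.foldl_map, ih]

lemma scanA_spec (N : Int) (B0 : List (List String)) (hpre : Pre_solution N B0) :
    ∀ (l : List (Int × Int)), (∀ p ∈ l, inGrid N p) →
    ∀ (r : Int) (b : List (List String)) (W : Finset (Int × Int)), GoodS N B0 b W →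
    ∃ W', ScanRel N B0 l W r (W', (l.foldl (stepA N) (r, b)).1) ∧
      GoodS N B0 (l.foldl (stepA N) (r, b)).2 W' ∧
      (∀ p ∈ l, p ∈ zfin N B0 → p ∈ W') ∧ W ⊆ W' := by
  intro l
  induction l with
  | nil =>
    intro _ r b W hGood
    exact ⟨W, ScanRel.nil W r, hGood, by simp, le_refl W⟩
  | cons p l ih =>
    intro hl r b W hGood
    have hg : inGrid N p := hl p List.mem_cons_self
    have hlG : ∀ q ∈ l, inGrid N q := fun q hq => hl q (List.mem_cons_of_mem p hq)
    obtain ⟨hWz, hWcl, M, hb, hMchar⟩ := hGood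
    have hcell : getCell b p.1 p.2 = modelC N B0 W M p := by
      rw [hb.2.2 p.1 p.2 hg.1 hg.2.2.1]
    have hcb : check_bomb N b p.1 p.2 = cntCell N B0 p.1 p.2 :=
      BState_check N B0 b W M hb hWz (fun q hq => ((hMchar q).1 hq).1) p.1 p.2
    have hcond_iff : (getCell b p.1 p.2 = "." ∧ check_bomb N b p.1 p.2 = 0) ↔
        (p ∈ zfin N B0 ∧ p ∉ W) := by
      rw [hcell, hcb, modelC_dot, mem_zfin]
      constructor
      · rintro ⟨⟨hpW, hpM, horig⟩, hcnt⟩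
        exact ⟨⟨hg, horig, hcnt⟩, hpW⟩
      · rintro ⟨⟨_, horig, hcnt⟩, hpW⟩
        refine ⟨⟨hpW, ?_, horig⟩, hcnt⟩
        intro hpM
        exact ((hMchar p).1 hpM).1.2.2 hcnt
    rw [List.foldl_cons]
    by_cases hcond : p ∈ zfin N B0 ∧ p ∉ W
    · have hstep : stepA N (r, b) p = (r + 1, bfs N b p.1 p.2) := by
        unfold stepA; rw [if_pos (hcond_iff.2 hcond)]
      rw [hstep]
      obtain ⟨W₁, hGood₁, hchar₁⟩ :=
        bfs_spec N B0 hpre b W ⟨hWz, hWcl, M, hb, hMchar⟩ p hcond.1 hcond.2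
      obtain ⟨W', hscan', hGood', hcov', hsub'⟩ := ih hlG (r + 1) _ W₁ hGood₁
      refine ⟨W', ScanRel.hit hcond.1 hcond.2 hchar₁ hscan', hGood', ?_, ?_⟩
      · intro q hq hqz
        rcases List.mem_cons.1 hq with rfl | hq'
        · exact hsub' ((hchar₁ q).2 (Or.inr ⟨hqz, Relation.ReflTransGen.refl⟩))
        · exact hcov' q hq' hqz
      · exact Finset.Subset.trans (fun q hq => (hchar₁ q).2 (Or.inl hq)) hsub'
    · have hstep : stepA N (r, b) p = (r, b) := by
        unfold stepA; rw [if_neg (fun hc => hcond (hcond_iff.1 hc))]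
      rw [hstep]
      obtain ⟨W', hscan', hGood', hcov', hsub'⟩ := ih hlG r b W ⟨hWz, hWcl, M, hb, hMchar⟩
      refine ⟨W', ScanRel.skip hcond hscan', hGood', ?_, hsub'⟩
      intro q hq hqz
      rcases List.mem_cons.1 hq with rfl | hq'
      · have : q ∈ W := by
          by_contra hqW
          exact hcond ⟨hqz, hqW⟩
        exact hsub' this
      · exact hcov' q hq' hqz

lemma scanB_spec (N : Int) (B0 : List (List String)) (zero : List (Int × Int))
    (hziff : ∀ p, p ∈ zero ↔ p ∈ zfin N B0) :
    ∀ (l : List (Int × Int)),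
    ∀ (r : Int) (seen : PySem.Set (Int × Int)),
    seen.Nodup → (∀ p ∈ seen, p ∈ zfin N B0) →
    (∀ p ∈ seen, ∀ q ∈ zfin N B0, adjP p q → q ∈ seen) →
    ∃ W', ScanRel N B0 l seen.toFinset r (W', (l.foldl (stepB N zero) (r, seen)).1) := by
  intro l
  induction l with
  | nil =>
    intro r seen _ _ _
    exact ⟨seen.toFinset, ScanRel.nil _ r⟩
  | cons p l ih =>
    intro r seen hnd hsz hcl
    rw [List.foldl_cons]
    by_cases hcond : p ∈ zero ∧ ¬ p ∈ seen
    · have hstep : stepB N zero (r, seen) p =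
          (r + 1, dfsLoop zero (N.toNat * N.toNat + 1) [p] (PySem.Set.add seen p)) := by
        unfold stepB; rw [if_pos hcond]
      rw [hstep]
      have hpz : p ∈ zfin N B0 := (hziff p).1 hcond.1
      obtain ⟨hnd', hsz', hcl', hchar'⟩ :=
        dfs_spec N B0 zero hziff seen hnd hsz hcl p hpz hcond.2
      obtain ⟨W', hscan'⟩ := ih (r + 1) _ hnd' hsz' hcl'
      refine ⟨W', ScanRel.hit hpz (fun hc => hcond.2 (List.mem_toFinset.1 hc)) ?_ hscan'⟩
      intro q
      rw [List.mem_toFinset, hchar' q, List.mem_toFinset]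
    · have hstep : stepB N zero (r, seen) p = (r, seen) := by
        unfold stepB; rw [if_neg hcond]
      rw [hstep]
      obtain ⟨W', hscan'⟩ := ih r seen hnd hsz hcl
      refine ⟨W', ScanRel.skip ?_ hscan'⟩
      rintro ⟨hz, hW⟩
      exact hcond ⟨(hziff p).2 hz, fun hc => hW (List.mem_toFinset.2 hc)⟩

lemma ScanRel_det (N : Int) (B0 : List (List String)) :
    ∀ {l : List (Int × Int)} {W : Finset (Int × Int)} {r : Int}
      {o₁ o₂ : Finset (Int × Int) × Int},
    ScanRel N B0 l W r o₁ → ScanRel N B0 l W r o₂ → o₁ = o₂ := by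
  intro l W r o₁ o₂ h1
  induction h1 generalizing o₂ with
  | nil W r =>
    intro h2
    cases h2 with
    | nil => rfl
  | skip hcond h ih =>
    intro h2
    cases h2 with
    | skip hcond' h' => exact ih h'
    | hit hz hW _ h' => exact absurd ⟨hz, hW⟩ hcond
  | hit hz hW hchar h ih =>
    intro h2
    cases h2 with
    | skip hcond' h' => exact absurd ⟨hz, hW⟩ hcond'
    | hit hz' hW' hchar' h' =>
      have hWeq := Finset.ext (fun q => (hchar' q).trans ((hchar q).symm))
      rw [hWeq] at h'
      exact ih h'

lemma GoodS_init (N : Int) (B0 : List (List String)) : GoodS N B0 B0 ∅ := by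
  refine ⟨Finset.empty_subset _, fun q hq => absurd hq (Finset.notMem_empty q), ∅,
    ⟨rfl, fun i => rfl, ?_⟩, ?_⟩
  · intro y x hy hx
    unfold modelC
    rw [if_neg (Finset.notMem_empty _), if_neg (Finset.notMem_empty _)]
  · intro p
    constructor
    · intro hp; exact absurd hp (Finset.notMem_empty p)
    · rintro ⟨_, q, hq, _⟩; exact absurd hq (Finset.notMem_empty q)

-- ---------- assembling the two ports ----------
lemma phase1A_eq (N : Int) (board : List (List String)) :
    (PySem.List.pyRange 0 N 1).foldl (fun (st : Int × List (List String)) y =>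
      (PySem.List.pyRange 0 N 1).foldl (fun (st : Int × List (List String)) x =>
        if getCell st.2 y x = "." ∧ check_bomb N st.2 y x = 0 then
          (st.1 + 1, bfs N st.2 y x)
        else st) st) (0, board) = (scanPairs N).foldl (stepA N) (0, board) :=
  foldl_nested _ _ (stepA N) _

lemma phase2A_eq (N : Int) (bA : List (List String)) (r0 : Int) :
    (PySem.List.pyRange 0 N 1).foldl (fun (r : Int) y =>
      (PySem.List.pyRange 0 N 1).foldl (fun (r : Int) x =>
        if getCell bA y x = "." then r + 1 else r) r) r0
    = r0 + ((scanPairs N).countP (fun p => decide (getCell bA p.1 p.2 = "."))) := by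
  have h := foldl_nested (PySem.List.pyRange 0 N 1) (PySem.List.pyRange 0 N 1)
    (fun (r : Int) (p : Int × Int) => if getCell bA p.1 p.2 = "." then r + 1 else r) r0
  refine h.trans ?_
  exact PySem.List.foldl_ite_add_one
    (fun p : Int × Int => getCell bA p.1 p.2 = ".") (scanPairs N) r0

lemma phase1B_eq (N : Int) (zero : List (Int × Int)) :
    (PySem.List.pyRange 0 N 1).foldl (fun (st : Int × PySem.Set (Int × Int)) y =>
      (PySem.List.pyRange 0 N 1).foldl (fun (st : Int × PySem.Set (Int × Int)) x =>
        if (y, x) ∈ zero ∧ ¬ (y, x) ∈ st.2 then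
          (st.1 + 1, dfsLoop zero (N.toNat * N.toNat + 1) [(y, x)] (PySem.Set.add st.2 (y, x)))
        else st) st) (0, PySem.Set.empty)
    = (scanPairs N).foldl (stepB N zero) (0, PySem.Set.empty) :=
  foldl_nested _ _ (stepB N zero) _

lemma phase2B_eq (N : Int) (board : List (List String)) (cnt : List (List Int))
    (zero : List (Int × Int)) (r0 : Int) :
    (PySem.List.pyRange 0 N 1).foldl (fun (r : Int) y =>
      (PySem.List.pyRange 0 N 1).foldl (fun (r : Int) x =>
        if getCell board y x = "." ∧ 0 < PySem.List.pyGetD (PySem.List.pyGetD cnt y []) x 0 ∧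
           ¬ (pvNbrs.any (fun d => decide ((y + d.1, x + d.2) ∈ zero))) then r + 1 else r) r) r0
    = r0 + ((scanPairs N).countP (fun p => decide (getCell board p.1 p.2 = "." ∧
        0 < PySem.List.pyGetD (PySem.List.pyGetD cnt p.1 []) p.2 0 ∧
        ¬ (pvNbrs.any (fun d => decide ((p.1 + d.1, p.2 + d.2) ∈ zero)))))) := by
  have h := foldl_nested (PySem.List.pyRange 0 N 1) (PySem.List.pyRange 0 N 1)
    (fun (r : Int) (p : Int × Int) =>
      if getCell board p.1 p.2 = "." ∧ 0 < PySem.List.pyGetD (PySem.List.pyGetD cnt p.1 []) p.2 0 ∧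
         ¬ (pvNbrs.any (fun d => decide ((p.1 + d.1, p.2 + d.2) ∈ zero))) then r + 1 else r) r0
  refine h.trans ?_
  exact PySem.List.foldl_ite_add_one _ (scanPairs N) r0

-- ===== VERDICT (by name: the statement is the Claim_ definition above) =====
theorem solution_spec : Claim_equal_solution := by
  unfold Claim_equal_solution Spec_solution
  intro N board hdom hpre
  obtain ⟨WA, hscanA, hGoodA, hcovA, -⟩ := scanA_spec N board hpre (scanPairs N)
    (fun p hp => (mem_scanPairs N p).1 hp) 0 board ∅ (GoodS_init N board)
  have hWA : WA = zfin N board := by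
    apply Finset.Subset.antisymm hGoodA.1
    intro p hp
    exact hcovA p ((mem_scanPairs N p).2 ((mem_zfin N board p).1 hp).1) hp
  obtain ⟨WB, hscanB⟩ := scanB_spec N board (zeroSet N board) (mem_zeroSet N board)
    (scanPairs N) 0 PySem.Set.empty List.nodup_nil
    (fun p hp => absurd hp (List.not_mem_nil))
    (fun p hp => absurd hp (List.not_mem_nil))
  have hscanB' : ScanRel N board (scanPairs N) ∅ 0
      (WB, ((scanPairs N).foldl (stepB N (zeroSet N board)) (0, PySem.Set.empty)).1) := hscanB
  have hdet := ScanRel_det N board hscanA hscanB'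
  have hr : ((scanPairs N).foldl (stepA N) (0, board)).1 =
      ((scanPairs N).foldl (stepB N (zeroSet N board)) (0, PySem.Set.empty)).1 :=
    congrArg Prod.snd hdet
  have hAeq : solution N board =
      ((scanPairs N).foldl (stepA N) (0, board)).1 +
        ((scanPairs N).countP (fun p => decide
          (getCell ((scanPairs N).foldl (stepA N) (0, board)).2 p.1 p.2 = "."))) := by
    unfold solution
    rw [phase1A_eq]
    exact phase2A_eq N ((scanPairs N).foldl (stepA N) (0, board)).2
      ((scanPairs N).foldl (stepA N) (0, board)).1
  have hBeq : solution_alt N board =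
      ((scanPairs N).foldl (stepB N (zeroSet N board)) (0, PySem.Set.empty)).1 +
        ((scanPairs N).countP (fun p => decide (getCell board p.1 p.2 = "." ∧
          0 < PySem.List.pyGetD (PySem.List.pyGetD (cntTable N board) p.1 []) p.2 0 ∧
          ¬ (pvNbrs.any (fun d => decide ((p.1 + d.1, p.2 + d.2) ∈ zeroSet N board)))))) := by
    simp only [solution_alt]
    rw [phase1B_eq]
    exact phase2B_eq N board (cntTable N board) (zeroSet N board) _
  rw [hAeq, hBeq, hr]
  congr 1
  apply congrArg (Nat.cast : Nat → Int)
  rw [hWA] at hGoodA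
  obtain ⟨hWz, hWcl, M, hb, hMchar⟩ := hGoodA
  apply List.countP_congr
  intro p hp
  have hg : inGrid N p := (mem_scanPairs N p).1 hp
  simp only [decide_eq_true_eq]
  have hcell : getCell ((scanPairs N).foldl (stepA N) (0, board)).2 p.1 p.2 =
      modelC N board (zfin N board) M p := hb.2.2 p.1 p.2 hg.1 hg.2.2.1
  rw [hcell, modelC_dot, cntLookup N board p.1 p.2 hg]
  constructor
  · rintro ⟨hnz, hnM, horig⟩
    have hcnt : cntCell N board p.1 p.2 ≠ 0 := by
      intro hc
      exact hnz ((mem_zfin N board p).2 ⟨hg, horig, hc⟩)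
    have hpos : 0 < cntCell N board p.1 p.2 := by
      have := cntCell_nonneg N board p.1 p.2
      omega
    refine ⟨horig, hpos, ?_⟩
    intro hany
    rw [List.any_eq_true] at hany
    obtain ⟨d, hd, hmem⟩ := hany
    rw [decide_eq_true_eq] at hmem
    have hqz : ((p.1 + d.1, p.2 + d.2) : Int × Int) ∈ zfin N board :=
      (mem_zeroSet N board _).1 hmem
    have hadj : adjP (p.1 + d.1, p.2 + d.2) p := by
      unfold adjP
      have : ((p.1 - (p.1 + d.1), p.2 - (p.2 + d.2)) : Int × Int) = (-d.1, -d.2) := by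
        apply Prod.ext <;> simp
      rw [this]
      exact pvNbrs_neg hd
    exact hnM ((hMchar p).2 ⟨⟨hg, horig, hcnt⟩, _, hqz, hadj⟩)
  · rintro ⟨horig, hpos, hnoany⟩
    refine ⟨?_, ?_, horig⟩
    · intro hz
      have := ((mem_zfin N board p).1 hz).2.2
      omega
    · intro hM
      obtain ⟨hbnd, q, hqz, hadj⟩ := (hMchar p).1 hM
      apply hnoany
      rw [List.any_eq_true]
      unfold adjP at hadj
      refine ⟨(q.1 - p.1, q.2 - p.2), ?_, ?_⟩
      · have : ((q.1 - p.1, q.2 - p.2) : Int × Int) =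
            (-(p.1 - q.1), -(p.2 - q.2)) := by
          apply Prod.ext <;> simp <;> ring
        rw [this]
        exact pvNbrs_neg hadj
      · rw [decide_eq_true_eq]
        have : ((p.1 + (q.1 - p.1), p.2 + (q.2 - p.2)) : Int × Int) = q := by
          apply Prod.ext <;> simp
        rw [this]
        exact (mem_zeroSet N board q).2 hqz
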